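-- pv_equiv track=rewrite | github.com/1zaboy/Labs | Lab6/Lab6.py | getSumRange
-- ===== SOURCE A (Python) =====
-- def getSumRange(arr):
--     sum = 0
--     isWrite = False
--     for item in arr:
--         if item > 0:
--             if isWrite:
--                 return sum
--             isWrite = True
--             continue
--
--         if isWrite:
--             sum = sum + item
--     return sum
-- ===== SOURCE B (Python) =====
-- def getSumRange(arr):
--     rest = _skip_past_first_positive(arr)
--     if rest is None:
--         return 0
--     return _sum_nonpos_prefix(rest)
--
-- def _skip_past_first_positive(arr):
--     # phase 1: drop elements up to and including the first positive
--     for i, x in enumerate(arr):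
--         if x > 0:
--             return arr[i + 1:]
--     return None
--
-- def _sum_nonpos_prefix(rest):
--     # phase 2: sum the non-positive prefix, stopping at the next positive
--     total = 0
--     for x in rest:
--         if x > 0:
--             break
--         total += x
--     return total
-- ===== Notes on version B (the rewrite author's own statement) =====
-- stated objective: simpler
-- what changed: Replaced the boolean-flag single loop with a two-phase decomposition: drop elements up to and including the first positive, then sum the non-positive prefix of the remainder.
import Mathlib
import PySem

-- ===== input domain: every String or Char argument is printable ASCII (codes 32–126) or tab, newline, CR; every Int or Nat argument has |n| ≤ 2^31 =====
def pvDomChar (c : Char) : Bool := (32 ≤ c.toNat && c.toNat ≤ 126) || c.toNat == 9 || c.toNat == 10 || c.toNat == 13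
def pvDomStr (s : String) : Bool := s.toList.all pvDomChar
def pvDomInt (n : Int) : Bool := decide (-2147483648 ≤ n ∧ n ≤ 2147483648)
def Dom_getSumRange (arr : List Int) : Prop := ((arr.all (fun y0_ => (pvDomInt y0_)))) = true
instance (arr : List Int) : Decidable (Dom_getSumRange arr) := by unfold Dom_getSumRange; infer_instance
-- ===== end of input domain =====

-- B replaces A's boolean-flag single loop by a two-phase decomposition (drop past first positive, then sum the non-positive prefix); same cost, simpler.


-- ===== PORT A =====
-- A's for-loop with accumulator `sum`, flag `isWrite` and early return, as structural recursion
def getSumRangeGo : List Int → Int → Bool → Int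
  | [], s, _ => s
  | x :: xs, s, w =>
    if x > 0 then
      if w then s else getSumRangeGo xs s true
    else
      if w then getSumRangeGo xs (s + x) w else getSumRangeGo xs s w

def getSumRange (arr : List Int) : Int := getSumRangeGo arr 0 false

-- ===== PORT B =====
-- phase 1: drop elements up to and including the first positive (none = no positive)
def skipPastFirstPositive : List Int → Option (List Int)
  | [] => none
  | x :: xs => if x > 0 then some xs else skipPastFirstPositive xs

-- phase 2: sum the non-positive prefix, stopping at the next positive
def sumNonposPrefix : List Int → Int → Int
  | [], total => total
  | x :: xs, total => if x > 0 then total else sumNonposPrefix xs (total + x)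

def getSumRange_alt (arr : List Int) : Int :=
  match skipPastFirstPositive arr with
  | none => 0
  | some rest => sumNonposPrefix rest 0

-- ===== PRECONDITION & SPEC =====
def Spec_getSumRange (arr : List Int) (out : Int) : Prop := out = getSumRange_alt arr
instance (arr : List Int) (out : Int) : Decidable (Spec_getSumRange arr out) := by unfold Spec_getSumRange; infer_instance

-- ===== CLAIM (what is proved, stated in full; the proofs are below) =====
def Claim_equal_getSumRange : Prop := ∀ (arr : List Int), Dom_getSumRange arr → Spec_getSumRange arr (getSumRange arr)

-- ===== LEMMAS AND PROOFS =====
theorem go_true_eq_sumNonpos (arr : List Int) : ∀ s, getSumRangeGo arr s true = sumNonposPrefix arr s := by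
  induction arr with
  | nil => intro s; rfl
  | cons x xs ih =>
    intro s
    simp only [getSumRangeGo, sumNonposPrefix]
    split_ifs with h
    · rfl
    · exact ih (s + x)

theorem go_false_eq (arr : List Int) : ∀ s, getSumRangeGo arr s false =
    match skipPastFirstPositive arr with
    | none => s
    | some rest => sumNonposPrefix rest s := by
  induction arr with
  | nil => intro s; rfl
  | cons x xs ih =>
    intro s
    by_cases h : x > 0
    · simp [getSumRangeGo, skipPastFirstPositive, h]
      exact go_true_eq_sumNonpos xs s
    · simp [getSumRangeGo, skipPastFirstPositive, h]
      exact ih s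

-- ===== VERDICT (by name: the statement is the Claim_ definition above) =====
theorem getSumRange_spec : Claim_equal_getSumRange := by
  intro arr _
  unfold Spec_getSumRange getSumRange getSumRange_alt
  rw [go_false_eq]
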